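-- pv_equiv track=rewrite | github.com/chuksoo/CodeMasters | TIP102 - Intermediate Technical Interview Prep/Unit 2 practice.py | count_endangered_species
-- ===== SOURCE A (Python) =====
-- def count_endangered_species(endangered_species, observed_species):
--     from collections import Counter
--     observed_map = Counter(observed_species)
--
--     count = 0
--     for item in endangered_species:
--         if item in observed_map:
--             count += observed_map[item]
--     return count
-- ===== SOURCE B (Python) =====
-- def count_endangered_species(endangered_species, observed_species):
--     from collections import Counter
--     ec = Counter(endangered_species)
--     oc = Counter(observed_species)
--     return sum(ec[x] * oc[x] for x in ec)
-- ===== Notes on version B (the rewrite author's own statement) =====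
-- stated objective: alternative
-- what changed: Instead of looping over every element of endangered_species with a membership test and lookup, B builds Counters of both lists and returns the frequency dot product: one pass over the DISTINCT endangered species, multiplying paired multiplicities.
import Mathlib
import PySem

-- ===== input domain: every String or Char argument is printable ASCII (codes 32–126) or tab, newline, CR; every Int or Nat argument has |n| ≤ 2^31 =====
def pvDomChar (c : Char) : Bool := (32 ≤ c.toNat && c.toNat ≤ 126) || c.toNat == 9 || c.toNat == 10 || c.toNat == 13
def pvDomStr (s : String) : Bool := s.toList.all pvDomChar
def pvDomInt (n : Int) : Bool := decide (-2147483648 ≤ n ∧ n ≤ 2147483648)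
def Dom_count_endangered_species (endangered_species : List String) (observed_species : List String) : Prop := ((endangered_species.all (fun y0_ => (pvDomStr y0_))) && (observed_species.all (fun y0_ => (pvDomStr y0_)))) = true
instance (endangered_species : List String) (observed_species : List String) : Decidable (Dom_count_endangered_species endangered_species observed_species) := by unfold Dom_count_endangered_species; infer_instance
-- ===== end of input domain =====

-- B replaces A's per-occurrence loop with a frequency dot product over the distinct endangered species (objective: alternative).

-- ===== PORT A =====
def count_endangered_species (endangered_species : List String) (observed_species : List String) : Int :=
  let observed_map := PySem.Dict.counter observed_species
  endangered_species.foldl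
    (fun count item =>
      if observed_map.contains item then count + observed_map.getD item 0 else count) 0

-- ===== PORT B =====
def count_endangered_species_alt (endangered_species : List String) (observed_species : List String) : Int :=
  let ec := PySem.Dict.counter endangered_species
  let oc := PySem.Dict.counter observed_species
  (ec.keys.map (fun x => ec.getD x 0 * oc.getD x 0)).sum

-- ===== PRECONDITION & SPEC =====
def Spec_count_endangered_species (endangered_species : List String) (observed_species : List String) (out : Int) : Prop := out = count_endangered_species_alt endangered_species observed_species
instance (endangered_species : List String) (observed_species : List String) (out : Int) : Decidable (Spec_count_endangered_species endangered_species observed_species out) := by unfold Spec_count_endangered_species; infer_instance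

-- ===== CLAIM (what is proved, stated in full; the proofs are below) =====
def Claim_equal_count_endangered_species : Prop := ∀ (endangered_species : List String) (observed_species : List String), Dom_count_endangered_species endangered_species observed_species → Spec_count_endangered_species endangered_species observed_species (count_endangered_species endangered_species observed_species)

-- ===== LEMMAS AND PROOFS =====

-- A's loop sums the observed multiplicity of every occurrence in endangered_species.
theorem pv_A_eq_sum (os : List String) : ∀ (es : List String) (init : Int),
    es.foldl
      (fun count item =>
        if (PySem.Dict.counter os).contains item then
          count + (PySem.Dict.counter os).getD item 0
        else count) init
      = init + (es.map (fun item => (os.count item : Int))).sum := by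
  intro es
  induction es with
  | nil => intro init; simp
  | cons a t ih =>
    intro init
    simp only [List.foldl_cons, List.map_cons, List.sum_cons, ih]
    by_cases h : (PySem.Dict.counter os).contains a = true
    · simp [h, PySem.Dict.getD_counter]; ring
    · have h0 : os.count a = 0 := by
        rw [PySem.Dict.contains_counter] at h
        simpa using List.count_eq_zero.mpr (by simpa using h)
      simp [h, h0]

-- Summing an if-singleton over a Nodup list containing a picks out v.
theorem pv_sum_single (S : List String) (a : String) (v : Int)
    (hnd : S.Nodup) (ha : a ∈ S) :
    (S.map (fun k => if k = a then v else 0)).sum = v := by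
  induction S with
  | nil => cases ha
  | cons s t ih =>
    rcases List.mem_cons.mp ha with h | h
    · have hz : ∀ k ∈ t, (if k = a then v else (0:Int)) = 0 := by
        intro k hk
        have hne : k ≠ a := by
          intro e
          exact (List.nodup_cons.mp hnd).1 (by rw [← h, ← e]; exact hk)
        simp [hne]
      simp [List.map_congr_left hz, ← h]
    · have hs : s ≠ a := fun e => (List.nodup_cons.mp hnd).1 (e ▸ h)
      simp [hs, ih (List.nodup_cons.mp hnd).2 h]

-- Frequency dot product over any Nodup superset of es's elements = per-occurrence sum.
theorem pv_dot_eq_sum (g : String → Int) : ∀ (es S : List String),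
    S.Nodup → (∀ x ∈ es, x ∈ S) →
    (S.map (fun k => (es.count k : Int) * g k)).sum = (es.map g).sum := by
  intro es
  induction es with
  | nil => intro S _ _; simp
  | cons a t ih =>
    intro S hnd hsub
    have step : ∀ k ∈ S, ((((a :: t).count k : Int)) * g k)
        = (t.count k : Int) * g k + (if k = a then g a else 0) := by
      intro k _
      by_cases hk : k = a
      · subst hk; simp [List.count_cons_self]; ring
      · have hne : a ≠ k := fun e => hk e.symm
        rw [List.count_cons_of_ne hne]
        simp [hk]
    rw [List.map_congr_left step]
    have := List.sum_map_add (l := S) (f := fun k => (t.count k : Int) * g k)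
      (g := fun k => if k = a then g a else 0)
    rw [this, ih S hnd (fun x hx => hsub x (List.mem_cons_of_mem a hx)),
      pv_sum_single S a (g a) hnd (hsub a (List.mem_cons_self))]
    simp [add_comm]

-- ===== VERDICT (by name: the statement is the Claim_ definition above) =====
theorem count_endangered_species_spec : Claim_equal_count_endangered_species := by
  intro es os _
  unfold Spec_count_endangered_species count_endangered_species count_endangered_species_alt
  rw [pv_A_eq_sum]
  simp only [PySem.Dict.keys_counter, PySem.Dict.getD_counter, zero_add]
  exact (pv_dot_eq_sum (fun x => (os.count x : Int)) es (PySem.Set.ofList es)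
      (PySem.Set.nodup_ofList es) (fun x hx => (PySem.Set.mem_ofList es x).mpr hx)).symm
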